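-- pv_equiv track=rewrite | github.com/zushicat/cologne-trees-static-API | scripts/_meta.py | _suburb_district
-- ===== SOURCE A (Python) =====
-- from typing import Any, Dict, List, Optional, Tuple
--
-- def _suburb_district(tree_data: List[Dict[str, Any]]) -> Dict[str, Any]:
--     suburb_list: Dict[str, str] = {}
--     for tree in tree_data:
--         suburb_name = tree["geo_info"]["suburb"]
--         if suburb_name is None:
--             continue
--
--         if suburb_list.get(suburb_name) is None:
--             suburb_list[suburb_name]: str = tree["geo_info"]["district"]
--         else:
--             continue
--
--     return suburb_list
-- ===== SOURCE B (Python) =====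
-- from typing import Any, Dict, List, Optional, Tuple
--
-- def _suburb_district(tree_data: List[Dict[str, Any]]) -> Dict[str, Any]:
--     # Pass 1: the distinct suburb names, in encounter order, skipping None.
--     suburbs: List[str] = []
--     for tree in tree_data:
--         s = tree["geo_info"]["suburb"]
--         if s is not None and s not in suburbs:
--             suburbs.append(s)
--     # Pass 2: each suburb maps to the first non-None district among its trees
--     # (None if every one of its trees has district None).
--     return {s: next((t["geo_info"]["district"] for t in tree_data
--                      if t["geo_info"]["suburb"] == s
--                      and t["geo_info"]["district"] is not None), None)
--             for s in suburbs}
-- ===== Notes on version B (the rewrite author's own statement) =====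
-- stated objective: alternative
-- what changed: A's single pass building a dict and overwriting a suburb's stored district until it becomes non-None is replaced by two staged passes over the list with no incremental dict at all: first collect the distinct suburb names in encounter order, then for each suburb scan the trees for the first non-None district (None if there is none).
import Mathlib
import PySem

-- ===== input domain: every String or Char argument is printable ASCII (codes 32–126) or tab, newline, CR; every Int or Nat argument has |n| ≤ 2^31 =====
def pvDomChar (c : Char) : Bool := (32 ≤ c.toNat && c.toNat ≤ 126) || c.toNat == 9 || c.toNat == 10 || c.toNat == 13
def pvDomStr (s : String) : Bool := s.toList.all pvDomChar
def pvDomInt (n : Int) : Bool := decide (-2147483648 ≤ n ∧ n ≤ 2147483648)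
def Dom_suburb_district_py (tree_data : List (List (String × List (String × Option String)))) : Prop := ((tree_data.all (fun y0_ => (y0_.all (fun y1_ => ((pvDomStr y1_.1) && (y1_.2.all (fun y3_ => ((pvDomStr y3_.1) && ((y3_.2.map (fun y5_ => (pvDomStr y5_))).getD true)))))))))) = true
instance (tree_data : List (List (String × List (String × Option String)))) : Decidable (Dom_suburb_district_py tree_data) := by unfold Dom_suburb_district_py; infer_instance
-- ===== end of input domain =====

-- B replaces A's single-pass dict build (overwrite a suburb's stored district until it
-- becomes non-None) by two staged passes with no incremental dict: collect the distinct
-- suburb names in order, then scan the trees per suburb for its first non-None district.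
-- Equality is proved on Pre_ (inputs where the Python A raises no KeyError).

-- Python's d[k] on an association list: first match, none = KeyError (exact by the
-- assoc-list convention: lookup is first match).
def pyKey? {α : Type} (d : List (String × α)) (k : String) : Option α :=
  (PySem.Dict.mk d).get? k

-- ===== PORT A =====
-- one iteration of A's for-loop
def pvAStep (acc : PySem.Dict String (Option String))
    (tree : List (String × List (String × Option String))) : PySem.Dict String (Option String) :=
  match pyKey? tree "geo_info" with
  | none => acc                  -- Python raises KeyError here; Pre_ excludes this
  | some gi =>
    match pyKey? gi "suburb" with
    | none => acc                -- KeyError; Pre_ excludes this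
    | some none => acc           -- suburb_name is None: continue
    | some (some s) =>
      match acc.get? s with
      | some (some _) => acc     -- suburb_list.get(...) is not None: continue
      | _ =>
        match pyKey? gi "district" with
        | none => acc            -- KeyError; Pre_ excludes this
        | some dv => acc.insert s dv

def suburb_district_py (tree_data : List (List (String × List (String × Option String)))) : List (String × Option String) :=
  (tree_data.foldl pvAStep PySem.Dict.empty).items

-- ===== PORT B =====
-- tree["geo_info"][k], flattening a None value; a missing key also yields none
-- (Python raises KeyError there; Pre_ excludes those inputs)
def pvGeoVal (tree : List (String × List (String × Option String))) (k : String) : Option String :=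
  ((pyKey? tree "geo_info").bind (fun gi => pyKey? gi k)).join

-- pass 1 of B: 'if s is not None and s not in suburbs: suburbs.append(s)'
def pvCollect (acc : List String) (tree : List (String × List (String × Option String))) : List String :=
  match pvGeoVal tree "suburb" with
  | some s => if s ∈ acc then acc else acc ++ [s]
  | none => acc

-- pass 2 of B: the generator 'next((t[..]["district"] for t in tree_data if suburb == s
-- and district is not None), None)' — first non-None district of suburb s
def pvFirst (tree_data : List (List (String × List (String × Option String)))) (s : String) : Option String :=
  tree_data.findSome? (fun t =>
    if pvGeoVal t "suburb" = some s then pvGeoVal t "district" else none)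

def suburb_district_py_alt (tree_data : List (List (String × List (String × Option String)))) : List (String × Option String) :=
  (tree_data.foldl pvCollect []).map (fun s => (s, pvFirst tree_data s))

-- ===== PRECONDITION & SPEC =====
-- Pre_ is exactly the inputs on which the Python A raises no KeyError: every tree has a
-- "geo_info" with a "suburb" key, and a tree with a non-None suburb but no "district" key
-- must be preceded by a tree of the same suburb that has a non-None district (only then
-- does A skip it without touching "district").
-- an earlier tree of suburb s carrying a non-None district
def pvHasDistrict (s : String) (u : List (String × List (String × Option String))) : Bool :=
  (pvGeoVal u "suburb" == some s) && (pvGeoVal u "district").isSome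

def pvTreeOK (earlier : List (List (String × List (String × Option String))))
    (tree : List (String × List (String × Option String))) : Bool :=
  match pyKey? tree "geo_info" with
  | none => false
  | some gi =>
    match pyKey? gi "suburb" with
    | none => false
    | some none => true
    | some (some s) => (pyKey? gi "district").isSome || earlier.any (pvHasDistrict s)

def Pre_suburb_district_py (tree_data : List (List (String × List (String × Option String)))) : Prop :=
  ∀ (i : Nat) (h : i < tree_data.length), pvTreeOK (tree_data.take i) tree_data[i] = true
instance (tree_data : List (List (String × List (String × Option String)))) : Decidable (Pre_suburb_district_py tree_data) := by unfold Pre_suburb_district_py; infer_instance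

def pvWitness_suburb_district_py : (List (List (String × List (String × Option String)))) :=
  [[("geo_info", [("suburb", some "a"), ("district", some "d1")])],
   [("geo_info", [("suburb", none), ("district", some "d2")])]]

def Spec_suburb_district_py (tree_data : List (List (String × List (String × Option String)))) (out : List (String × Option String)) : Prop := out = suburb_district_py_alt tree_data
instance (tree_data : List (List (String × List (String × Option String)))) (out : List (String × Option String)) : Decidable (Spec_suburb_district_py tree_data out) := by unfold Spec_suburb_district_py; infer_instance

-- ===== CLAIM (what is proved, stated in full; the proofs are below) =====
def Claim_equal_suburb_district_py : Prop := ∀ (tree_data : List (List (String × List (String × Option String)))), Dom_suburb_district_py tree_data → Pre_suburb_district_py tree_data → Spec_suburb_district_py tree_data (suburb_district_py tree_data)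

-- ===== LEMMAS AND PROOFS =====

-- Python's 'x or-else y' on optionals (A keeps a stored non-None value, else takes y)
def pvOr (a b : Option String) : Option String :=
  match a with
  | some x => some x
  | none => b

-- the suburbs pass-1 adds to an accumulator acc (the genuinely new ones, in order)
def pvNews (acc : List String) : List (List (String × List (String × Option String))) → List String
  | [] => []
  | t :: ts =>
    match pvGeoVal t "suburb" with
    | some s => if s ∈ acc then pvNews acc ts else s :: pvNews (acc ++ [s]) ts
    | none => pvNews acc ts

theorem pvCollect_eq (ts : List (List (String × List (String × Option String)))) (acc : List String) :
    ts.foldl pvCollect acc = acc ++ pvNews acc ts := by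
  induction ts generalizing acc with
  | nil => simp [pvNews]
  | cons t rest ih =>
    simp only [List.foldl_cons, pvCollect, pvNews]
    cases hs : pvGeoVal t "suburb" with
    | none => exact ih acc
    | some s =>
      by_cases hmem : s ∈ acc
      · simp [hmem, ih acc]
      · simp [hmem, ih (acc ++ [s])]

theorem pvNews_not_mem (ts : List (List (String × List (String × Option String)))) (acc : List String)
    (s : String) (h : s ∈ pvNews acc ts) : s ∉ acc := by
  induction ts generalizing acc with
  | nil => simp [pvNews] at h
  | cons t rest ih =>
    simp only [pvNews] at h
    cases hs : pvGeoVal t "suburb" with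
    | none => simp only [hs] at h; exact ih acc h
    | some s' =>
      simp only [hs] at h
      by_cases hmem : s' ∈ acc
      · rw [if_pos hmem] at h; exact ih acc h
      · rw [if_neg hmem] at h
        rcases List.mem_cons.mp h with rfl | h2
        · exact hmem
        · intro hin
          exact ih (acc ++ [s']) h2 (List.mem_append_left _ hin)

theorem pvFirst_cons_ne (t : List (String × List (String × Option String)))
    (rest : List (List (String × List (String × Option String)))) (s : String)
    (h : pvGeoVal t "suburb" ≠ some s) : pvFirst (t :: rest) s = pvFirst rest s := by
  simp [pvFirst, h]

theorem pvFirst_cons_self (t : List (String × List (String × Option String)))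
    (rest : List (List (String × List (String × Option String)))) (s : String)
    (h : pvGeoVal t "suburb" = some s) :
    pvFirst (t :: rest) s = pvOr (pvGeoVal t "district") (pvFirst rest s) := by
  simp only [pvFirst, List.findSome?_cons, if_pos h]
  cases pvGeoVal t "district" <;> rfl

-- the main loop characterisation: A's fold, started from any dict d with distinct keys
-- that already accounts for the trees of 'pre' (invariant hinv: a suburb with a non-None
-- district in 'pre' is stored non-None), keeps d's entries (a stored non-None value wins,
-- a stored None is replaced by the first non-None district in the remaining trees) and
-- appends the new suburbs with their first non-None district
theorem pvLoop (ts pre : List (List (String × List (String × Option String))))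
    (d : PySem.Dict String (Option String))
    (hP : ∀ (i : Nat) (h : i < ts.length), pvTreeOK (pre ++ ts.take i) ts[i] = true)
    (hnd : d.keys.Nodup)
    (hinv : ∀ s, pre.any (pvHasDistrict s) = true → ∃ x, d.get? s = some (some x)) :
    (ts.foldl pvAStep d).items
      = d.items.map (fun p => (p.1, pvOr p.2 (pvFirst ts p.1)))
        ++ (pvNews d.keys ts).map (fun s => (s, pvFirst ts s)) := by
  induction ts generalizing d pre with
  | nil =>
    simp only [List.foldl_nil, pvNews, List.map_nil, List.append_nil]
    have : ∀ p ∈ d.items, (p.1, pvOr p.2 (pvFirst [] p.1)) = p := by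
      rintro ⟨a, b⟩ _
      cases b <;> rfl
    rw [List.map_congr_left this]; simp
  | cons t rest ih =>
    have hPt : pvTreeOK pre t = true := by
      have := hP 0 (by simp)
      simpa using this
    have hPr : ∀ (i : Nat) (h : i < rest.length),
        pvTreeOK ((pre ++ [t]) ++ rest.take i) rest[i] = true := by
      intro i h
      have := hP (i + 1) (by simpa using Nat.succ_lt_succ h)
      simpa [List.take_succ_cons, List.append_assoc] using this
    cases hgeo : pyKey? t "geo_info" with
    | none =>
      simp [pvTreeOK, hgeo] at hPt
    | some gi =>
      cases hsub : pyKey? gi "suburb" with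
      | none =>
        simp [pvTreeOK, hgeo, hsub] at hPt
      | some sopt =>
        cases sopt with
        | none =>
          -- suburb is None: both the step and the characterisation skip this tree
          have hgv : pvGeoVal t "suburb" = none := by simp [pvGeoVal, hgeo, hsub]
          have hstep : pvAStep d t = d := by simp only [pvAStep, hgeo, hsub]
          have hfst : ∀ s, pvFirst (t :: rest) s = pvFirst rest s := fun s =>
            pvFirst_cons_ne t rest s (by rw [hgv]; simp)
          have hinv' : ∀ s, (pre ++ [t]).any (pvHasDistrict s) = true →
              ∃ x, d.get? s = some (some x) := by
            intro s htrig
            rcases (by simpa using htrig : pre.any (pvHasDistrict s) = true ∨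
                pvHasDistrict s t = true) with h1 | h1
            · exact hinv s h1
            · rw [pvHasDistrict, hgv] at h1; simp at h1
          simp only [List.foldl_cons, hstep, pvNews, hgv]
          rw [ih (pre ++ [t]) d hPr hnd hinv']
          congr 1
          · exact List.map_congr_left (fun p _ => by rw [hfst])
          · exact List.map_congr_left (fun s _ => by rw [hfst])
        | some s =>
          have hgv : pvGeoVal t "suburb" = some s := by simp [pvGeoVal, hgeo, hsub]
          simp only [pvTreeOK, hgeo, hsub] at hPt
          have hne : ∀ s', s' ≠ s → pvFirst (t :: rest) s' = pvFirst rest s' := by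
            intro s' hss
            exact pvFirst_cons_ne t rest s' (by rw [hgv]; simpa using fun h => hss h.symm)
          have huniq : ∀ p ∈ d.items, p.1 = s → d.get? s = some p.2 := by
            intro p hp h1
            have := PySem.Dict.get?_of_mem_items d hp hnd
            rwa [h1] at this
          -- trigger maintenance for suburbs other than s, and for s when this tree's
          -- district is None: this tree fires no new trigger
          have htrig_of : ∀ s', (pre ++ [t]).any (pvHasDistrict s') = true →
              pre.any (pvHasDistrict s') = true ∨
              (s' = s ∧ (pvGeoVal t "district").isSome = true) := by
            intro s' htrig
            rcases (by simpa using htrig : pre.any (pvHasDistrict s') = true ∨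
                pvHasDistrict s' t = true) with h1 | h1
            · exact Or.inl h1
            · rw [pvHasDistrict, hgv] at h1
              simp only [Bool.and_eq_true, beq_iff_eq, Option.some_inj] at h1
              exact Or.inr ⟨h1.1.symm, h1.2⟩
          cases hdis : pyKey? gi "district" with
          | none =>
            -- no "district" key: A only returns because an earlier tree of this suburb
            -- already stored a non-None district, so the stored value wins and A skips
            rw [hdis] at hPt
            simp only [Option.isSome_none, Bool.false_or] at hPt
            obtain ⟨x, hget⟩ := hinv s hPt
            have hgd : pvGeoVal t "district" = none := by simp [pvGeoVal, hgeo, hdis]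
            have hfst : ∀ s', pvFirst (t :: rest) s' = pvFirst rest s' := by
              intro s'
              by_cases h1 : s' = s
              · subst h1; rw [pvFirst_cons_self t rest s' hgv, hgd]; rfl
              · exact hne s' h1
            have hmemk : s ∈ d.keys := by
              have : d.contains s = true := by
                rw [PySem.Dict.contains_eq_isSome_get?, hget]; rfl
              exact (PySem.Dict.contains_iff_mem_keys d s).mp this
            have hnews : pvNews d.keys (t :: rest) = pvNews d.keys rest := by
              simp only [pvNews, hgv, if_pos hmemk]
            have hstep : pvAStep d t = d := by
              simp only [pvAStep, hgeo, hsub, hget]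
            have hinv' : ∀ s', (pre ++ [t]).any (pvHasDistrict s') = true →
                ∃ y, d.get? s' = some (some y) := by
              intro s' htrig
              rcases htrig_of s' htrig with h1 | ⟨rfl, h1⟩
              · exact hinv s' h1
              · rw [hgd] at h1; simp at h1
            simp only [List.foldl_cons, hstep, hnews]
            rw [ih (pre ++ [t]) d hPr hnd hinv']
            congr 1
            · exact List.map_congr_left (fun p _ => by rw [hfst])
            · exact List.map_congr_left (fun s' _ => by rw [hfst])
          | some dv =>
            have hgd : pvGeoVal t "district" = dv := by simp [pvGeoVal, hgeo, hdis]
            have hself : pvFirst (t :: rest) s = pvOr dv (pvFirst rest s) := by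
              rw [pvFirst_cons_self t rest s hgv, hgd]
            cases hget : d.get? s with
            | some v =>
              have hmemk : s ∈ d.keys := by
                have : d.contains s = true := by
                  rw [PySem.Dict.contains_eq_isSome_get?, hget]; rfl
                exact (PySem.Dict.contains_iff_mem_keys d s).mp this
              have hnews : pvNews d.keys (t :: rest) = pvNews d.keys rest := by
                simp only [pvNews, hgv, if_pos hmemk]
              cases v with
              | some x =>
                -- stored value already non-None: A skips the tree
                have hstep : pvAStep d t = d := by
                  simp only [pvAStep, hgeo, hsub, hget]
                have hinv' : ∀ s', (pre ++ [t]).any (pvHasDistrict s') = true →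
                    ∃ y, d.get? s' = some (some y) := by
                  intro s' htrig
                  rcases htrig_of s' htrig with h1 | ⟨rfl, _⟩
                  · exact hinv s' h1
                  · exact ⟨x, hget⟩
                simp only [List.foldl_cons, hstep, hnews]
                rw [ih (pre ++ [t]) d hPr hnd hinv']
                congr 1
                · refine List.map_congr_left ?_
                  rintro ⟨a, b⟩ hp
                  by_cases h1 : a = s
                  · have hb : b = some x := by
                      have := huniq (a, b) hp h1
                      rw [hget] at this
                      exact (Option.some_inj.mp this).symm
                    subst hb; rfl
                  · rw [hne a h1]
                · refine List.map_congr_left ?_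
                  intro s' hs'
                  have : s' ∉ d.keys := pvNews_not_mem rest d.keys s' hs'
                  rw [hne s' (fun h => this (h ▸ hmemk))]
              | none =>
                -- stored value is None: A overwrites it with this tree's district
                have hc : d.contains s = true := by
                  rw [PySem.Dict.contains_eq_isSome_get?, hget]; rfl
                have hstep : pvAStep d t = d.insert s dv := by
                  simp only [pvAStep, hgeo, hsub, hget, hdis]
                have hkeys : (d.insert s dv).keys = d.keys :=
                  PySem.Dict.keys_insert_of_contains d dv hc
                have hinv' : ∀ s', (pre ++ [t]).any (pvHasDistrict s') = true →
                    ∃ y, (d.insert s dv).get? s' = some (some y) := by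
                  intro s' htrig
                  rcases htrig_of s' htrig with h1 | ⟨rfl, h1⟩
                  · obtain ⟨y, hy⟩ := hinv s' h1
                    by_cases h2 : s' = s
                    · subst h2; rw [hget] at hy; exact absurd hy (by simp)
                    · exact ⟨y, by rw [PySem.Dict.get?_insert_of_ne d dv h2, hy]⟩
                  · rw [hgd] at h1
                    obtain ⟨y, hy⟩ := Option.isSome_iff_exists.mp h1
                    exact ⟨y, by rw [hy, PySem.Dict.get?_insert_self]⟩
                have hnews : pvNews d.keys (t :: rest) = pvNews d.keys rest := by
                  simp only [pvNews, hgv, if_pos hmemk]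
                simp only [List.foldl_cons, hstep, hnews]
                rw [ih (pre ++ [t]) (d.insert s dv) hPr (hkeys ▸ hnd) hinv', hkeys,
                    PySem.Dict.items_insert_of_contains d dv hc, List.map_map]
                congr 1
                · refine List.map_congr_left ?_
                  rintro ⟨a, b⟩ hp
                  by_cases h1 : a = s
                  · have hb : b = none := by
                      have := huniq (a, b) hp h1
                      rw [hget] at this
                      exact (Option.some_inj.mp this).symm
                    subst h1; subst hb
                    simp only [Function.comp_apply, BEq.rfl, if_pos, pvOr, hself]
                  · have hbeq : (a == s) = false := by simp [h1]
                    simp only [Function.comp_apply, hbeq, Bool.false_eq_true, if_false,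
                      hne a h1]
                · refine List.map_congr_left ?_
                  intro s' hs'
                  have : s' ∉ d.keys := pvNews_not_mem rest d.keys s' hs'
                  rw [hne s' (fun h => this (h ▸ hmemk))]
            | none =>
              -- fresh suburb: A appends a new entry
              have hc : d.contains s = false := by
                rw [PySem.Dict.contains_eq_isSome_get?, hget]; rfl
              have hmemk : s ∉ d.keys := fun h =>
                by rw [(PySem.Dict.contains_iff_mem_keys d s).mpr h] at hc; exact absurd hc (by simp)
              have hstep : pvAStep d t = d.insert s dv := by
                simp only [pvAStep, hgeo, hsub, hget, hdis]
              have hkeys : (d.insert s dv).keys = d.keys ++ [s] :=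
                PySem.Dict.keys_insert_of_not_contains d dv hc
              have hinv' : ∀ s', (pre ++ [t]).any (pvHasDistrict s') = true →
                  ∃ y, (d.insert s dv).get? s' = some (some y) := by
                intro s' htrig
                rcases htrig_of s' htrig with h1 | ⟨rfl, h1⟩
                · obtain ⟨y, hy⟩ := hinv s' h1
                  by_cases h2 : s' = s
                  · subst h2; rw [hget] at hy; exact absurd hy (by simp)
                  · exact ⟨y, by rw [PySem.Dict.get?_insert_of_ne d dv h2, hy]⟩
                · rw [hgd] at h1
                  obtain ⟨y, hy⟩ := Option.isSome_iff_exists.mp h1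
                  exact ⟨y, by rw [hy, PySem.Dict.get?_insert_self]⟩
              have hnews : pvNews d.keys (t :: rest) = s :: pvNews (d.keys ++ [s]) rest := by
                simp only [pvNews, hgv, if_neg hmemk]
              simp only [List.foldl_cons, hstep, hnews]
              rw [ih (pre ++ [t]) (d.insert s dv) hPr
                    (hkeys ▸ PySem.Dict.nodup_keys_insert d s dv hnd) hinv', hkeys,
                  PySem.Dict.items_insert_of_not_contains d dv hc, List.map_append]
              simp only [List.map_cons, List.map_nil, List.append_assoc,
                List.singleton_append, List.map_cons]
              congr 1
              · refine List.map_congr_left ?_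
                rintro ⟨a, b⟩ hp
                have ha : a ∈ d.keys := by
                  simp only [PySem.Dict.keys]
                  exact List.mem_map.mpr ⟨(a, b), hp, rfl⟩
                rw [hne a (fun h => hmemk (h ▸ ha))]
              · congr 1
                · rw [hself]
                · refine List.map_congr_left ?_
                  intro s' hs'
                  have : s' ∉ d.keys ++ [s] := pvNews_not_mem rest (d.keys ++ [s]) s' hs'
                  rw [hne s' (fun h => this (List.mem_append_right _ (h ▸ List.mem_singleton_self s)))]

-- ===== VERDICT (by name: the statement is the Claim_ definition above) =====
theorem suburb_district_py_spec : Claim_equal_suburb_district_py := by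
  intro tree_data _ hpre
  show suburb_district_py tree_data = suburb_district_py_alt tree_data
  have hP : ∀ (i : Nat) (h : i < tree_data.length),
      pvTreeOK ([] ++ tree_data.take i) tree_data[i] = true := by
    intro i h; simpa using hpre i h
  rw [suburb_district_py, suburb_district_py_alt,
      pvLoop tree_data [] PySem.Dict.empty hP List.Pairwise.nil (by intro s h; simp at h),
      pvCollect_eq]
  rfl
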